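-- pv_equiv track=rewrite | github.com/gurujbc/footbag-platform | legacy_data/inputs/curated/records/08_score_trick_sequences.py | decompose_trick
-- ===== SOURCE A (Python) =====
-- from typing import Optional
--
-- ROTATIONAL_BASES: set[str] = {
--     "mirage",
--     "whirl",
--     "torque",
--     "blender",
--     "swirl",
--     "drifter",
--     "eggbeater",
-- }
--
-- def decompose_trick(
--     trick_canon: str,
--     trick_dict: dict[str, Optional[int]],
--     modifiers: dict[str, dict],
-- ) -> tuple[Optional[int], str]:
--     """
--     Attempt modifier decomposition for a trick not in the dictionary.
--
--     Returns (adds, method_note) where adds is None if decomposition fails.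
--
--     Strategy: iterate over all possible prefix lengths (1..N-1 tokens).
--     For each prefix, check if every token is a known modifier AND the
--     remaining suffix matches a scored entry in the dictionary.
--     Accept the first decomposition where base ADD is known.
--     """
--     words = trick_canon.split()
--     if len(words) < 2:
--         return None, "no_decomposition_possible"
--
--     for split_point in range(1, len(words)):
--         mod_tokens = words[:split_point]
--         base_candidate = " ".join(words[split_point:])
--
--         # All prefix tokens must be known modifiers
--         if not all(t in modifiers for t in mod_tokens):
--             continue
--
--         # Base must be in dictionary with a score
--         base_adds = trick_dict.get(base_candidate)
--         if base_adds is None: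
--             # Try alias resolution of base
--             continue
--
--         # Base scored — compute total
--         is_rotational = base_candidate in ROTATIONAL_BASES
--         bonus = 0
--         unknown_mod = False
--         for mod in mod_tokens:
--             m = modifiers.get(mod)
--             if m is None:
--                 unknown_mod = True
--                 break
--             bonus += m["add_bonus_rotational"] if is_rotational else m["add_bonus"]
--
--         if unknown_mod:
--             return None, f"unknown_modifier_in_{mod_tokens}"
--
--         total = base_adds + bonus
--         return total, f"decomposed:{'+'.join(mod_tokens)}+{base_candidate}({base_adds})+bonus({bonus})"
--
--     return None, "decomposition_failed"
-- ===== SOURCE B (Python) =====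
-- from typing import Optional
--
-- ROTATIONAL_BASES: set[str] = {
--     "mirage",
--     "whirl",
--     "torque",
--     "blender",
--     "swirl",
--     "drifter",
--     "eggbeater",
-- }
--
-- def decompose_trick(
--     trick_canon: str,
--     trick_dict: dict[str, Optional[int]],
--     modifiers: dict[str, dict],
-- ) -> tuple[Optional[int], str]:
--     """Inverted strategy: instead of probing the dictionary suffix by suffix,
--     build an index of the admissible suffixes and scan the dictionary ONCE,
--     keeping the split point closest to the front (A's first-hit order)."""
--     words = trick_canon.split()
--     if len(words) < 2:
--         return None, "no_decomposition_possible"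
--
--     # Leading run of modifier tokens bounds the admissible split points.
--     run = 0
--     while run < len(words) and words[run] in modifiers:
--         run += 1
--     hi = min(run, len(words) - 1)
--
--     # Index: admissible base string -> its split point.
--     suffix_sp = {" ".join(words[sp:]): sp for sp in range(1, hi + 1)}
--
--     # One pass over the dictionary; smallest split point wins.
--     best_sp = None
--     for key, score in trick_dict.items():
--         sp = suffix_sp.get(key)
--         if score is not None and sp is not None and (best_sp is None or sp < best_sp):
--             best_sp = sp
--
--     if best_sp is None:
--         return None, "decomposition_failed"
--
--     base = " ".join(words[best_sp:])
--     base_adds = trick_dict[base]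
--     bkey = "add_bonus_rotational" if base in ROTATIONAL_BASES else "add_bonus"
--     prefix = words[:best_sp]
--     bonus = sum(modifiers[t][bkey] for t in prefix)
--     return base_adds + bonus, f"decomposed:{'+'.join(prefix)}+{base}({base_adds})+bonus({bonus})"
-- ===== Notes on version B (the rewrite author's own statement) =====
-- stated objective: alternative
-- what changed: B inverts the search: it builds an index from each admissible suffix string (bounded by the leading modifier run) to its split point and then scans the dictionary entries once, keeping the smallest split point, instead of A's loop over split points that re-checks the prefix and probes the dictionary at each split.
import Mathlib
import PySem

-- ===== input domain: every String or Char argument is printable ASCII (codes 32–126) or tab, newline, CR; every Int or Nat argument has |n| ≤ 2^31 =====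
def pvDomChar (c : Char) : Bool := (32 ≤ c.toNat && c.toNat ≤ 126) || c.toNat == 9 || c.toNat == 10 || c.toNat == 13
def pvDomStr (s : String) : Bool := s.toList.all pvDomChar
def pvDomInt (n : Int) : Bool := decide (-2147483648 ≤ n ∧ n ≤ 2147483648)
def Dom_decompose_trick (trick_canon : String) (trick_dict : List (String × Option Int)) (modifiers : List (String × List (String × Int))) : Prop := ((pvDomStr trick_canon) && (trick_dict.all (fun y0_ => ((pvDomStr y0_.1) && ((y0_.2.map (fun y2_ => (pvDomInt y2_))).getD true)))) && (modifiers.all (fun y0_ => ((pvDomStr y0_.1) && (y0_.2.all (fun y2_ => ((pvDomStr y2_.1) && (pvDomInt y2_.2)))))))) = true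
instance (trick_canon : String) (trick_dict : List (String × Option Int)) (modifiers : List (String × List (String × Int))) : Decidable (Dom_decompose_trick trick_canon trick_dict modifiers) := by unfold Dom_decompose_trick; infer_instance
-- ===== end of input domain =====

-- B inverts A's search: it indexes the admissible suffixes and scans the dictionary once for the
-- smallest split point, instead of A's split-point loop probing the dictionary (objective: alternative).

-- ===== PORT A =====

def pvRot : List String := ["mirage", "whirl", "torque", "blender", "swirl", "drifter", "eggbeater"]

-- Python str(list_of_str): dead code in A (the branch is unreachable after the all-check); exact
-- only for tokens without quotes/backslashes, which is irrelevant since the branch never runs.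
def pvPyRepr (ts : List String) : String :=
  "[" ++ PySem.Str.join ", " (ts.map (fun t => "'" ++ t ++ "'")) ++ "]"

-- A's bonus loop with the early 'break' on an unknown modifier (none = the unknown_mod flag).
-- m[key] is ported as getD … 0: exact under Pre_ (the key is present for every reachable modifier).
def pvBonusA (modifiers : List (String × List (String × Int))) (isRot : Bool) :
    List String → Int → Option Int
  | [], bonus => some bonus
  | m :: rest, bonus =>
    match (PySem.Dict.mk modifiers).get? m with
    | none => none
    | some md =>
      pvBonusA modifiers isRot rest
        (bonus + if isRot then PySem.Dict.getD (PySem.Dict.mk md) "add_bonus_rotational" 0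
                 else PySem.Dict.getD (PySem.Dict.mk md) "add_bonus" 0)

def pvLoopA (trick_dict : List (String × Option Int)) (modifiers : List (String × List (String × Int)))
    (words : List String) (sp : Nat) : Option Int × String :=
  if h : sp < words.length then
    -- mod_tokens = words[:sp], base_candidate = " ".join(words[sp:]) (inlined)
    if (words.take sp).all (fun t => (PySem.Dict.mk modifiers).contains t) then
      match (PySem.Dict.mk trick_dict).get? (PySem.Str.join " " (words.drop sp)) with
      | some (some base_adds) =>
        match pvBonusA modifiers (pvRot.contains (PySem.Str.join " " (words.drop sp)))
            (words.take sp) 0 with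
        | none => (none, "unknown_modifier_in_" ++ pvPyRepr (words.take sp))
        | some bonus =>
          (some (base_adds + bonus),
            "decomposed:" ++ PySem.Str.join "+" (words.take sp) ++ "+" ++
              PySem.Str.join " " (words.drop sp) ++ "(" ++
              PySem.Int.toStr base_adds ++ ")+bonus(" ++ PySem.Int.toStr bonus ++ ")")
      | _ => pvLoopA trick_dict modifiers words (sp + 1)
    else pvLoopA trick_dict modifiers words (sp + 1)
  else (none, "decomposition_failed")
termination_by words.length - sp

def decompose_trick (trick_canon : String) (trick_dict : List (String × Option Int)) (modifiers : List (String × List (String × Int))) : Option Int × String :=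
  let words := PySem.Str.split₀ trick_canon
  if words.length < 2 then (none, "no_decomposition_possible")
  else pvLoopA trick_dict modifiers words 1

-- ===== PORT B =====

-- run = length of the maximal leading run of modifier tokens.
def pvRunLen (modifiers : List (String × List (String × Int))) : List String → Nat
  | [] => 0
  | w :: ws => if (PySem.Dict.mk modifiers).contains w then pvRunLen modifiers ws + 1 else 0

-- suffix_sp = {" ".join(words[sp:]): sp for sp in range(1, hi + 1)}
def pvSuffixMap (words : List String) (hi : Nat) : PySem.Dict String Nat :=
  (PySem.List.pyRange 1 ((hi : Int) + 1) 1).foldl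
    (fun d sp => d.insert (PySem.Str.join " " (words.drop sp.toNat)) sp.toNat) PySem.Dict.empty

-- the dictionary scan: smallest indexed split point among scored entries.
def pvScan (sm : PySem.Dict String Nat) : List (String × Option Int) → Option Nat → Option Nat
  | [], best => best
  | (k, score) :: rest, best =>
    pvScan sm rest
      (match score, sm.get? k with
       | some _, some sp => if best.elim true (fun b => sp < b) then some sp else best
       | _, _ => best)

-- bonus = sum(modifiers[t][bkey] for t in prefix); both lookups ported as getD with a default
-- (exact under Pre_: t lies in the modifier run, so modifiers[t] exists, and the key is present).
def pvBonusB (modifiers : List (String × List (String × Int))) (key : String)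
    (pre : List String) : Int :=
  pre.foldl (fun b t =>
    b + PySem.Dict.getD (PySem.Dict.mk (((PySem.Dict.mk modifiers).get? t).getD [])) key 0) 0

def decompose_trick_alt (trick_canon : String) (trick_dict : List (String × Option Int)) (modifiers : List (String × List (String × Int))) : Option Int × String :=
  let words := PySem.Str.split₀ trick_canon
  if words.length < 2 then (none, "no_decomposition_possible")
  else
    let hi := min (pvRunLen modifiers words) (words.length - 1)
    match pvScan (pvSuffixMap words hi) trick_dict none with
    | none => (none, "decomposition_failed")
    | some sp =>
      let base := PySem.Str.join " " (words.drop sp)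
      -- trick_dict[base]: the key is present with a non-None score whenever the scan succeeds
      -- (proved below), so the getD defaults are never used.
      let base_adds := (((PySem.Dict.mk trick_dict).get? base).getD none).getD 0
      let bonus := pvBonusB modifiers
        (if pvRot.contains base then "add_bonus_rotational" else "add_bonus") (words.take sp)
      (some (base_adds + bonus),
        "decomposed:" ++ PySem.Str.join "+" (words.take sp) ++ "+" ++ base ++ "(" ++
          PySem.Int.toStr base_adds ++ ")+bonus(" ++ PySem.Int.toStr bonus ++ ")")

-- ===== PRECONDITION & SPEC =====
-- Pre_ excludes (i) inputs where a modifier named by a non-final word of trick_canon lacks the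
-- "add_bonus"/"add_bonus_rotational" keys — there Python A (and B) can raise KeyError; this is
-- slightly wider than the exact crash set (A still returns when no decomposition reaches the bonus
-- loop — see claim.json "cites") — and (ii) association lists for trick_dict with duplicate keys,
-- which encode no Python dict (on them dict lookup vs iteration over items would disagree accidentally).
def Pre_decompose_trick (trick_canon : String) (trick_dict : List (String × Option Int)) (modifiers : List (String × List (String × Int))) : Prop :=
  (((PySem.Str.split₀ trick_canon).dropLast.all (fun t =>
    match (PySem.Dict.mk modifiers).get? t with
    | some md => (PySem.Dict.mk md).contains "add_bonus" && (PySem.Dict.mk md).contains "add_bonus_rotational"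
    | none => true)) = true) ∧ (trick_dict.map Prod.fst).Nodup
instance (trick_canon : String) (trick_dict : List (String × Option Int)) (modifiers : List (String × List (String × Int))) : Decidable (Pre_decompose_trick trick_canon trick_dict modifiers) := by unfold Pre_decompose_trick; infer_instance

def pvWitness_decompose_trick : String × (List (String × Option Int)) × (List (String × List (String × Int))) :=
  ("clipper mirage", [("mirage", some 3)], [("clipper", [("add_bonus", 1), ("add_bonus_rotational", 2)])])

def Spec_decompose_trick (trick_canon : String) (trick_dict : List (String × Option Int)) (modifiers : List (String × List (String × Int))) (out : Option Int × String) : Prop := out = decompose_trick_alt trick_canon trick_dict modifiers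
instance (trick_canon : String) (trick_dict : List (String × Option Int)) (modifiers : List (String × List (String × Int))) (out : Option Int × String) : Decidable (Spec_decompose_trick trick_canon trick_dict modifiers out) := by unfold Spec_decompose_trick; infer_instance

-- ===== CLAIM (what is proved, stated in full; the proofs are below) =====
def Claim_equal_decompose_trick : Prop := ∀ (trick_canon : String) (trick_dict : List (String × Option Int)) (modifiers : List (String × List (String × Int))), Dom_decompose_trick trick_canon trick_dict modifiers → Pre_decompose_trick trick_canon trick_dict modifiers → Spec_decompose_trick trick_canon trick_dict modifiers (decompose_trick trick_canon trick_dict modifiers)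

-- ===== LEMMAS AND PROOFS =====

-- The all-modifiers check on a prefix of length sp is exactly "sp ≤ leading run length".
lemma pv_take_all_iff (modifiers : List (String × List (String × Int))) :
    ∀ (ws : List String) (sp : Nat), sp ≤ ws.length →
      ((ws.take sp).all (fun t => (PySem.Dict.mk modifiers).contains t)
        = decide (sp ≤ pvRunLen modifiers ws)) := by
  intro ws
  induction ws with
  | nil => intro sp h; simp_all
  | cons w ws ih =>
    intro sp h
    cases sp with
    | zero => simp
    | succ sp =>
      simp only [List.take_succ_cons, List.all_cons, pvRunLen]
      by_cases hw : (PySem.Dict.mk modifiers).contains w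
      · simp only [hw, Bool.true_and, reduceIte]
        rw [ih sp (by simpa using h)]
        simp
      · simp [hw]

-- A's bonus loop never hits the unknown branch when every token is a known modifier,
-- and then computes B's fold.
lemma pv_bonusA_eq (modifiers : List (String × List (String × Int))) (isRot : Bool) :
    ∀ (ts : List String) (b : Int),
      ts.all (fun t => (PySem.Dict.mk modifiers).contains t) = true →
      pvBonusA modifiers isRot ts b =
        some (ts.foldl (fun b t =>
          b + PySem.Dict.getD (PySem.Dict.mk (((PySem.Dict.mk modifiers).get? t).getD []))
                (if isRot then "add_bonus_rotational" else "add_bonus") 0) b) := by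
  intro ts
  induction ts with
  | nil => intro b _; simp [pvBonusA]
  | cons t ts ih =>
    intro b hall
    simp only [List.all_cons, Bool.and_eq_true] at hall
    have hs : ((PySem.Dict.mk modifiers).get? t).isSome := by
      rw [← PySem.Dict.contains_eq_isSome_get?]; exact hall.1
    cases hget : (PySem.Dict.mk modifiers).get? t with
    | none => rw [hget] at hs; simp at hs
    | some md =>
      simp only [pvBonusA, hget, List.foldl_cons, Option.getD_some]
      rw [ih _ hall.2]
      cases isRot <;> simp

-- Dropping one more word makes the joined suffix strictly shorter (the separator guarantees it).
lemma pv_join_drop_len_lt (ws : List String) (sp : Nat) (h : sp + 1 < ws.length) :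
    (PySem.Str.join " " (ws.drop (sp + 1))).toList.length
      < (PySem.Str.join " " (ws.drop sp)).toList.length := by
  have hd : ws.drop sp = ws[sp] :: ws.drop (sp + 1) := List.drop_eq_getElem_cons (by omega)
  have hne : ws.drop (sp + 1) ≠ [] := by
    intro hnil
    have := List.length_drop (l := ws) (i := sp + 1)
    rw [hnil] at this; simp at this; omega
  obtain ⟨b, t, hbt⟩ := List.exists_cons_of_ne_nil hne
  rw [hd, hbt]
  simp [PySem.Str.join, PySem.Chars.join, List.intercalate]
  omega

-- Distinct split points below the length give distinct suffix strings.
lemma pv_join_drop_len_lt_of_lt (ws : List String) :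
    ∀ (sp2 sp1 : Nat), sp1 < sp2 → sp2 < ws.length →
      (PySem.Str.join " " (ws.drop sp2)).toList.length
        < (PySem.Str.join " " (ws.drop sp1)).toList.length := by
  intro sp2
  induction sp2 with
  | zero => intro sp1 h _; omega
  | succ n ih =>
    intro sp1 h1 h2
    rcases Nat.lt_or_ge sp1 n with hlt | hge
    · exact lt_trans (pv_join_drop_len_lt ws n h2) (ih sp1 hlt (by omega))
    · have : sp1 = n := by omega
      subst this
      exact pv_join_drop_len_lt ws sp1 h2

lemma pv_join_drop_inj (ws : List String) {sp1 sp2 : Nat} (h : sp1 < sp2) (h2 : sp2 < ws.length) :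
    PySem.Str.join " " (ws.drop sp1) ≠ PySem.Str.join " " (ws.drop sp2) := by
  intro heq
  have := pv_join_drop_len_lt_of_lt ws sp2 sp1 h h2
  rw [heq] at this
  omega

-- What the suffix map answers: key ↦ sp exactly for the admissible suffixes.
lemma pv_sm_get? (ws : List String) (hi : Nat) (hhi : hi < ws.length) (key : String) (sp : Nat) :
    (pvSuffixMap ws hi).get? key = some sp ↔
      (1 ≤ sp ∧ sp ≤ hi ∧ key = PySem.Str.join " " (ws.drop sp)) := by
  have hmapNodup : ((PySem.List.pyRange 1 ((hi : Int) + 1) 1).map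
      (fun a => PySem.Str.join " " (ws.drop a.toNat))).Nodup := by
    rw [PySem.List.pyRange_of_pos _ _ (by norm_num), List.map_map]
    refine List.Nodup.map_on ?_ List.nodup_range
    intro x hx y hy hxy
    simp only [List.mem_range] at hx hy
    simp only [Function.comp_apply] at hxy
    have ex : ((1 : Int) + 1 * (x : Nat)).toNat = x + 1 := by omega
    have ey : ((1 : Int) + 1 * (y : Nat)).toNat = y + 1 := by omega
    rw [ex, ey] at hxy
    by_contra hne
    have hN : (if (1 : Int) < (hi : Int) + 1 then (((hi : Int) + 1 - 1 + 1 - 1) / 1).toNat else 0) ≤ hi := by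
      split
      · simp only [Int.ediv_one]; omega
      · omega
    rcases Nat.lt_or_ge x y with hlt | hge
    · exact pv_join_drop_inj ws (by omega) (by omega : y + 1 < ws.length) hxy
    · exact pv_join_drop_inj ws (by omega : y + 1 < x + 1) (by omega : x + 1 < ws.length) hxy.symm
  have hitems : (pvSuffixMap ws hi).items = (PySem.List.pyRange 1 ((hi : Int) + 1) 1).map
      (fun a => (PySem.Str.join " " (ws.drop a.toNat), a.toNat)) := by
    unfold pvSuffixMap
    rw [PySem.Dict.items_foldl_insert_fresh _ _ _ _ (fun a _ => by simp [pysem]) hmapNodup]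
    simp [show (PySem.Dict.empty : PySem.Dict String Nat).items = [] from rfl]
  have hkeys : (pvSuffixMap ws hi).keys.Nodup := by
    have hk : (pvSuffixMap ws hi).keys = (PySem.List.pyRange 1 ((hi : Int) + 1) 1).map
        (fun a => PySem.Str.join " " (ws.drop a.toNat)) := by
      simp only [PySem.Dict.keys, hitems, List.map_map]
      rfl
    rw [hk]; exact hmapNodup
  rw [PySem.Dict.get?_eq_some_iff_mem_items _ _ _ hkeys, hitems, List.mem_map]
  constructor
  · rintro ⟨a, ha, heq⟩
    rw [PySem.List.mem_pyRange_one] at ha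
    have hsp : a.toNat = sp := congrArg Prod.snd heq
    have hkey : PySem.Str.join " " (ws.drop a.toNat) = key := congrArg Prod.fst heq
    refine ⟨by omega, by omega, ?_⟩
    rw [← hkey, hsp]
  · rintro ⟨h1, h2, rfl⟩
    refine ⟨(sp : Int), ?_, ?_⟩
    · rw [PySem.List.mem_pyRange_one]
      constructor <;> [exact_mod_cast h1; exact_mod_cast (by omega : (sp : Int) < (hi : Int) + 1)]
    · simp

-- The scan is a running minimum over the indexed, scored entries.
lemma pv_scan_eq_foldl (sm : PySem.Dict String Nat) :
    ∀ (l : List (String × Option Int)) (best : Option Nat),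
      pvScan sm l best =
        (l.filterMap (fun p => if p.2.isSome then sm.get? p.1 else none)).foldl
          (fun b sp => if b.elim true (fun x => sp < x) then some sp else b) best := by
  intro l
  induction l with
  | nil => intro best; rfl
  | cons p rest ih =>
    intro best
    obtain ⟨k, score⟩ := p
    cases score with
    | none => simpa [pvScan] using ih best
    | some v =>
      cases hg : sm.get? k with
      | none => simp [pvScan, hg, ih]
      | some sp => simp [pvScan, hg, ih]

lemma pv_foldl_minO_some (L : List Nat) (b : Nat) :
    L.foldl (fun b sp => if Option.elim b true (fun x => sp < x) then some sp else b) (some b)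
      = some (L.foldl min b) := by
  induction L generalizing b with
  | nil => rfl
  | cons x t ih =>
    simp only [List.foldl_cons, Option.elim_some]
    by_cases hx : x < b
    · have hmin : min b x = x := by omega
      simp [hx, ih, hmin]
    · have hmin : min b x = b := by omega
      simp [hx, ih, hmin]

-- ===== the main equivalence =====

-- A's loop fails when no admissible split point at or past sp is scored.
lemma pv_loopA_fail (trick_dict : List (String × Option Int))
    (modifiers : List (String × List (String × Int))) (words : List String) :
    ∀ sp, (∀ m, sp ≤ m → m < words.length → m ≤ pvRunLen modifiers words →
        ∀ v, (PySem.Dict.mk trick_dict).get? (PySem.Str.join " " (words.drop m)) ≠ some (some v)) →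
      pvLoopA trick_dict modifiers words sp = (none, "decomposition_failed") := by
  intro sp
  induction hn : words.length - sp using Nat.strong_induction_on generalizing sp with
  | _ n ih =>
    intro hno
    rw [pvLoopA]
    split
    · next hlt =>
      rw [pv_take_all_iff modifiers words sp (by omega)]
      by_cases hrun : sp ≤ pvRunLen modifiers words
      · simp only [hrun, decide_true, if_true]
        cases hget : (PySem.Dict.mk trick_dict).get? (PySem.Str.join " " (words.drop sp)) with
        | none =>
          exact ih (words.length - (sp + 1)) (by omega) (sp + 1) rfl
            (fun m hm => hno m (by omega))
        | some v =>
          cases v with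
          | none =>
            exact ih (words.length - (sp + 1)) (by omega) (sp + 1) rfl
              (fun m hm => hno m (by omega))
          | some x => exact absurd hget (hno sp le_rfl hlt hrun x)
      · simp only [hrun, decide_false, Bool.false_eq_true, if_false]
        exact ih (words.length - (sp + 1)) (by omega) (sp + 1) rfl
          (fun m hm => hno m (by omega))
    · rfl

-- A's loop returns at the least admissible scored split point.
lemma pv_loopA_hit (trick_dict : List (String × Option Int))
    (modifiers : List (String × List (String × Int))) (words : List String) :
    ∀ sp m v, sp ≤ m → m < words.length → m ≤ pvRunLen modifiers words →
      (PySem.Dict.mk trick_dict).get? (PySem.Str.join " " (words.drop m)) = some (some v) →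
      (∀ m', sp ≤ m' → m' < m → m' ≤ pvRunLen modifiers words →
        ∀ v', (PySem.Dict.mk trick_dict).get? (PySem.Str.join " " (words.drop m')) ≠ some (some v')) →
      pvLoopA trick_dict modifiers words sp =
        (some (v + pvBonusB modifiers
            (if pvRot.contains (PySem.Str.join " " (words.drop m)) then "add_bonus_rotational"
             else "add_bonus") (words.take m)),
          "decomposed:" ++ PySem.Str.join "+" (words.take m) ++ "+" ++
            PySem.Str.join " " (words.drop m) ++ "(" ++ PySem.Int.toStr v ++ ")+bonus(" ++
            PySem.Int.toStr (pvBonusB modifiers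
              (if pvRot.contains (PySem.Str.join " " (words.drop m)) then "add_bonus_rotational"
               else "add_bonus") (words.take m)) ++ ")") := by
  intro sp m v hspm hmlen hmrun hget hmin
  induction hn : m - sp using Nat.strong_induction_on generalizing sp with
  | _ n ih =>
    rcases Nat.lt_or_ge sp m with hlt | hge
    · -- sp < m: this iteration falls through
      rw [pvLoopA]
      rw [dif_pos (by omega : sp < words.length)]
      rw [pv_take_all_iff modifiers words sp (by omega)]
      by_cases hrun : sp ≤ pvRunLen modifiers words
      · simp only [hrun, decide_true, if_true]
        cases hget' : (PySem.Dict.mk trick_dict).get? (PySem.Str.join " " (words.drop sp)) with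
        | none =>
          exact ih (m - (sp + 1)) (by omega) (sp + 1) (by omega)
            (fun m' hm' => hmin m' (by omega)) rfl
        | some w =>
          cases w with
          | none =>
            exact ih (m - (sp + 1)) (by omega) (sp + 1) (by omega)
              (fun m' hm' => hmin m' (by omega)) rfl
          | some x => exact absurd hget' (hmin sp le_rfl hlt hrun x)
      · simp only [hrun, decide_false, Bool.false_eq_true, if_false]
        exact ih (m - (sp + 1)) (by omega) (sp + 1) (by omega)
          (fun m' hm' => hmin m' (by omega)) rfl
    · -- sp = m: return here
      have hsp : sp = m := by omega
      subst hsp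
      rw [pvLoopA]
      rw [dif_pos (by omega : sp < words.length)]
      have hallt : (words.take sp).all (fun t => (PySem.Dict.mk modifiers).contains t) = true := by
        rw [pv_take_all_iff modifiers words sp (by omega)]
        simpa using hmrun
      rw [hallt]
      simp only [if_true]
      rw [hget]
      rw [pv_bonusA_eq modifiers _ _ 0 hallt]
      rfl

-- ===== VERDICT (by name: the statement is the Claim_ definition above) =====
-- The scored admissible split points seen by B's scan are exactly those A's loop accepts.
lemma pv_hits_iff (trick_dict : List (String × Option Int)) (words : List String) (hi : Nat)
    (hhilt : hi < words.length) (hnodupD : (PySem.Dict.mk trick_dict).keys.Nodup) (m : Nat) :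
    m ∈ trick_dict.filterMap
        (fun p => if p.2.isSome then (pvSuffixMap words hi).get? p.1 else none) ↔
      (1 ≤ m ∧ m ≤ hi ∧
        ∃ v, (PySem.Dict.mk trick_dict).get? (PySem.Str.join " " (words.drop m)) = some (some v)) := by
  rw [List.mem_filterMap]
  constructor
  · rintro ⟨p, hp, hsome⟩
    by_cases hs : p.2.isSome
    · rw [if_pos hs] at hsome
      obtain ⟨h1, h2, hkey⟩ := (pv_sm_get? words hi hhilt p.1 m).1 hsome
      obtain ⟨v, hv⟩ := Option.isSome_iff_exists.1 hs
      refine ⟨h1, h2, v, ?_⟩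
      have hpi : (p.1, p.2) ∈ (PySem.Dict.mk trick_dict).items := by
        simpa using hp
      have hq := PySem.Dict.get?_of_mem_items _ hpi hnodupD
      rw [← hkey, hq, hv]
    · rw [if_neg hs] at hsome; exact absurd hsome (by simp)
  · rintro ⟨h1, h2, v, hv⟩
    have hmem := PySem.Dict.mem_items_of_get?_eq_some _ hv
    refine ⟨(PySem.Str.join " " (words.drop m), some v), by simpa using hmem, ?_⟩
    rw [if_pos (by simp)]
    exact (pv_sm_get? words hi hhilt _ m).2 ⟨h1, h2, rfl⟩

-- ===== VERDICT (by name: the statement is the Claim_ definition above) =====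
theorem decompose_trick_spec : Claim_equal_decompose_trick := by
  intro tc td mods _ hpre
  obtain ⟨_, hnodup⟩ := hpre
  unfold Spec_decompose_trick decompose_trick decompose_trick_alt
  by_cases hlen : (PySem.Str.split₀ tc).length < 2
  · simp [hlen]
  · simp only [hlen, if_false]
    have hw2 : 2 ≤ (PySem.Str.split₀ tc).length := by omega
    generalize hwords : PySem.Str.split₀ tc = words at *
    have hhilt : min (pvRunLen mods words) (words.length - 1) < words.length := by omega
    have hnodupD : (PySem.Dict.mk td).keys.Nodup := by simpa using hnodup
    rw [pv_scan_eq_foldl]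
    cases hfm : td.filterMap
        (fun p => if p.2.isSome then
          (pvSuffixMap words (min (pvRunLen mods words) (words.length - 1))).get? p.1 else none) with
    | nil =>
      simp only [List.foldl_nil]
      rw [pv_loopA_fail]
      intro m hm1 hmlen hmrun v hv
      have hmm : m ∈ ([] : List Nat) := by
        rw [← hfm]
        exact (pv_hits_iff td words _ hhilt hnodupD m).2 ⟨hm1, by omega, v, hv⟩
      simp at hmm
    | cons h t =>
      simp only [List.foldl_cons, Option.elim_none, if_true]
      rw [pv_foldl_minO_some]
      have hminh := PySem.List.foldl_min_mem t h
      have hminle := PySem.List.foldl_min_le t h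
      have hmm : t.foldl min h ∈ td.filterMap
          (fun p => if p.2.isSome then
            (pvSuffixMap words (min (pvRunLen mods words) (words.length - 1))).get? p.1 else none) := by
        rw [hfm]
        rcases hminh with heq | hmem
        · rw [heq]; exact List.mem_cons_self
        · exact List.mem_cons_of_mem _ hmem
      obtain ⟨h1, h2, v, hv⟩ := (pv_hits_iff td words _ hhilt hnodupD _).1 hmm
      have hleast : ∀ x ∈ h :: t, t.foldl min h ≤ x := by
        intro x hx
        rcases List.mem_cons.1 hx with rfl | hxt
        · exact hminle.1
        · exact hminle.2 x hxt
      have hminimal : ∀ m', 1 ≤ m' → m' < t.foldl min h → m' ≤ pvRunLen mods words →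
          ∀ v', (PySem.Dict.mk td).get? (PySem.Str.join " " (words.drop m')) ≠ some (some v') := by
        intro m' hm'1 hm'lt hm'run v' hv'
        have hm'mem : m' ∈ h :: t := by
          rw [← hfm]
          exact (pv_hits_iff td words _ hhilt hnodupD m').2
            ⟨hm'1, by omega, v', hv'⟩
        have := hleast m' hm'mem
        omega
      rw [pv_loopA_hit td mods words 1 (t.foldl min h) v h1 (by omega) (by omega) hv hminimal]
      simp only [hv, Option.getD_some]
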